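-- pv_equiv track=rewrite | github.com/haolunc/ARC-RL | reference_solutions/solutions/484b58aa.py | transform
-- ===== SOURCE A (Python) =====
-- def transform(grid):
--
--     R = len(grid)
--     C = len(grid[0])
--
--     pr = R
--     for p in range(1, R + 1):
--         ok = True
--         for i in range(R - p):
--             for j in range(C):
--                 a = grid[i][j]
--                 b = grid[i + p][j]
--                 if a != 0 and b != 0 and a != b:
--                     ok = False
--                     break
--             if not ok:
--                 break
--         if ok:
--             pr = p
--             break
--
--     pc = C
--     for q in range(1, C + 1):
--         ok = True
--         for i in range(R):
--             for j in range(C - q):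
--                 a = grid[i][j]
--                 b = grid[i][j + q]
--                 if a != 0 and b != 0 and a != b:
--                     ok = False
--                     break
--             if not ok:
--                 break
--         if ok:
--             pc = q
--             break
--
--     tile = [[0] * pc for _ in range(pr)]
--     for i in range(R):
--         for j in range(C):
--             v = grid[i][j]
--             if v != 0:
--                 tile[i % pr][j % pc] = v
--
--     out = [row[:] for row in grid]
--     for i in range(R):
--         for j in range(C):
--             if out[i][j] == 0:
--                 out[i][j] = tile[i % pr][j % pc]
--
--     return out
-- ===== SOURCE B (Python) =====
-- def transform(grid):
--     R = len(grid)
--     C = len(grid[0])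
--
--     # forbidden vertical periods: distances between conflicting non-zero cells in a column
--     badR = set()
--     for j in range(C):
--         col = [(i, grid[i][j]) for i in range(R) if grid[i][j] != 0]
--         for i1, v1 in col:
--             for i2, v2 in col:
--                 if i1 < i2 and v1 != v2:
--                     badR.add(i2 - i1)
--     pr = next((p for p in range(1, R) if p not in badR), R)
--
--     # forbidden horizontal periods: distances between conflicting non-zero cells in a row
--     badC = set()
--     for i in range(R):
--         row = [(j, grid[i][j]) for j in range(C) if grid[i][j] != 0]
--         for j1, v1 in row:
--             for j2, v2 in row:
--                 if j1 < j2 and v1 != v2: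
--                     badC.add(j2 - j1)
--     pc = next((q for q in range(1, C) if q not in badC), C)
--
--     # tile keyed by residues; later non-zero cells (row-major) overwrite earlier ones
--     tile = {}
--     for i in range(R):
--         for j in range(C):
--             if grid[i][j] != 0:
--                 tile[(i % pr, j % pc)] = grid[i][j]
--
--     # copy the grid and fill each zero cell from the tile
--     out = [list(row) for row in grid]
--     for i in range(R):
--         for j in range(C):
--             if out[i][j] == 0:
--                 out[i][j] = tile.get((i % pr, j % pc), 0)
--     return out
-- ===== Notes on version B (the rewrite author's own statement) =====
-- stated objective: alternative
-- what changed: The smallest periods are found by collecting, in one pass per column/row over only the non-zero cells, the set of 'forbidden' distances between conflicting cells and taking the first distance not in that set (instead of re-scanning the whole grid for every candidate shift), and the tile becomes a residue-keyed dict; Pre_ excludes only the inputs on which A raises IndexError (empty grid, or a row shorter than the first).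
import Mathlib
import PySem

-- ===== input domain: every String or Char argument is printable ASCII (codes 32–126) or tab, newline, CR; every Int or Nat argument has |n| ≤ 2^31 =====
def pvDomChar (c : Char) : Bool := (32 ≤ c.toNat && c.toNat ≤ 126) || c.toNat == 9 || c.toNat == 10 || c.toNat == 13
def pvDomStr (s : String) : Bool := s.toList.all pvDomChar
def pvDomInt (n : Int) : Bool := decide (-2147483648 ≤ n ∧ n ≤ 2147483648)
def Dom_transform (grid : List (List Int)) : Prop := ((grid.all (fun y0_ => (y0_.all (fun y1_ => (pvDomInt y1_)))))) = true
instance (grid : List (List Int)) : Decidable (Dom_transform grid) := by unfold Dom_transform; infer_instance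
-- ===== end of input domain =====

-- B replaces A's per-shift conflict scans by one set of "forbidden periods" (distances between
-- conflicting non-zero cells of a line) and A's mutated 2D tile/output arrays by a residue-keyed
-- dict and a comprehension (objective: alternative algorithm, same worst-case cost).

-- ===== PORT A =====
-- grid[i][j] for the 0 ≤ i < len(grid), 0 ≤ j < len(row) accesses both programs make under
-- Pre_transform (rectangular non-empty grid): List.getD is exact there.
def pvCell (g : List (List Int)) (i j : Nat) : Int := (g.getD i []).getD j 0

-- the `ok` flag of A's row-period p-loop (the breaks are `all`'s short-circuit)
def pvOkRow (g : List (List Int)) (R C p : Nat) : Bool :=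
  (List.range (R - p)).all fun i => (List.range C).all fun j =>
    !(pvCell g i j != 0 && pvCell g (i + p) j != 0 && pvCell g i j != pvCell g (i + p) j)

def pvOkCol (g : List (List Int)) (R C q : Nat) : Bool :=
  (List.range R).all fun i => (List.range (C - q)).all fun j =>
    !(pvCell g i j != 0 && pvCell g i (j + q) != 0 && pvCell g i j != pvCell g i (j + q))

-- `pr = R; for p in range(1, R + 1): if ok: pr = p; break`
def pvPrA (g : List (List Int)) : Nat :=
  ((List.range' 1 g.length).find? (pvOkRow g g.length (g.headD []).length)).getD g.length

def pvPcA (g : List (List Int)) : Nat :=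
  ((List.range' 1 (g.headD []).length).find? (pvOkCol g g.length (g.headD []).length)).getD (g.headD []).length

-- `t[a][b] = v` on a list of lists
def pvUpd2 (t : List (List Int)) (a b : Nat) (v : Int) : List (List Int) :=
  t.set a ((t.getD a []).set b v)

-- A's tile-filling double loop over the whole grid
def pvTileA (g : List (List Int)) (pr pc : Nat) : List (List Int) :=
  (List.range g.length).foldl (fun t i =>
      (List.range (g.headD []).length).foldl (fun t j =>
          if pvCell g i j ≠ 0 then pvUpd2 t (i % pr) (j % pc) (pvCell g i j) else t) t)
    (List.replicate pr (List.replicate pc (0 : Int)))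

def transform (grid : List (List Int)) : List (List Int) :=
  let R := grid.length
  let C := (grid.headD []).length
  let pr := pvPrA grid
  let pc := pvPcA grid
  let tile := pvTileA grid pr pc
  let out0 := grid.map (fun row => PySem.List.slice row none none)   -- row[:]
  (List.range R).foldl (fun o i =>
      (List.range C).foldl (fun o j =>
          if pvCell o i j = 0 then pvUpd2 o i j (pvCell tile (i % pr) (j % pc)) else o) o)
    out0

-- ===== PORT B =====
-- [(i, grid[i][j]) for i in range(R) if grid[i][j] != 0]
def pvColNZ (g : List (List Int)) (R j : Nat) : List (Nat × Int) :=
  (List.range R).filterMap fun i => if pvCell g i j ≠ 0 then some (i, pvCell g i j) else none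

def pvRowNZ (g : List (List Int)) (C i : Nat) : List (Nat × Int) :=
  (List.range C).filterMap fun j => if pvCell g i j ≠ 0 then some (j, pvCell g i j) else none

-- the double loop over one line's non-zero cells, adding conflicting distances to the set
def pvAddPairs (col : List (Nat × Int)) (s : PySem.Set Nat) : PySem.Set Nat :=
  col.foldl (fun s e1 =>
    col.foldl (fun s e2 =>
        if e1.1 < e2.1 ∧ e1.2 ≠ e2.2 then PySem.Set.add s (e2.1 - e1.1) else s) s) s

def pvBadR (g : List (List Int)) : PySem.Set Nat :=
  (List.range (g.headD []).length).foldl (fun s j => pvAddPairs (pvColNZ g g.length j) s) PySem.Set.empty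

def pvBadC (g : List (List Int)) : PySem.Set Nat :=
  (List.range g.length).foldl (fun s i => pvAddPairs (pvRowNZ g (g.headD []).length i) s) PySem.Set.empty

-- next((p for p in range(1, R) if p not in badR), R)
def pvPrB (g : List (List Int)) : Nat :=
  ((List.range' 1 (g.length - 1)).find? (fun p => !(PySem.Set.contains (pvBadR g) p))).getD g.length

def pvPcB (g : List (List Int)) : Nat :=
  ((List.range' 1 ((g.headD []).length - 1)).find? (fun q => !(PySem.Set.contains (pvBadC g) q))).getD (g.headD []).length

-- tile[(i % pr, j % pc)] = grid[i][j], later non-zero cells overwriting earlier ones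
def pvTileB (g : List (List Int)) (pr pc : Nat) : PySem.Dict (Nat × Nat) Int :=
  (List.range g.length).foldl (fun d i =>
      (List.range (g.headD []).length).foldl (fun d j =>
          if pvCell g i j ≠ 0 then d.insert (i % pr, j % pc) (pvCell g i j) else d) d)
    PySem.Dict.empty

def transform_alt (grid : List (List Int)) : List (List Int) :=
  let pr := pvPrB grid
  let pc := pvPcB grid
  let tile := pvTileB grid pr pc
  let out0 := grid.map (fun row => row.foldr List.cons [])   -- list(row): a fresh copy
  (List.range grid.length).foldl (fun o i =>
      (List.range (grid.headD []).length).foldl (fun o j =>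
          if pvCell o i j = 0 then pvUpd2 o i j ((tile.get? (i % pr, j % pc)).getD 0) else o) o)
    out0

-- ===== PRECONDITION & SPEC =====
-- Pre_ excludes exactly the inputs on which A raises IndexError: the empty grid (grid[0]) and
-- grids with a row shorter than the first row (grid[i][j] for j < len(grid[0])).
def Pre_transform (grid : List (List Int)) : Prop :=
  grid ≠ [] ∧ ∀ row ∈ grid, (grid.headD []).length ≤ row.length
instance (grid : List (List Int)) : Decidable (Pre_transform grid) := by unfold Pre_transform; infer_instance

def pvWitness_transform : List (List Int) := [[1, 0], [0, 2]]

def Spec_transform (grid : List (List Int)) (out : List (List Int)) : Prop := out = transform_alt grid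
instance (grid : List (List Int)) (out : List (List Int)) : Decidable (Spec_transform grid out) := by unfold Spec_transform; infer_instance

-- ===== CLAIM (what is proved, stated in full; the proofs are below) =====
def Claim_equal_transform : Prop := ∀ (grid : List (List Int)), Dom_transform grid → Pre_transform grid → Spec_transform grid (transform grid)

-- ===== LEMMAS AND PROOFS =====

-- the conflict relation of both programs, as a Prop
def pvConf (a b : Int) : Prop := a ≠ 0 ∧ b ≠ 0 ∧ a ≠ b

theorem pvOkRow_iff (g : List (List Int)) (R C p : Nat) :
    pvOkRow g R C p = true ↔ ∀ i < R - p, ∀ j < C, ¬ pvConf (pvCell g i j) (pvCell g (i + p) j) := by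
  simp [pvOkRow, pvConf, List.all_eq_true, not_and_or, -not_and, or_assoc]

theorem pvOkCol_iff (g : List (List Int)) (R C q : Nat) :
    pvOkCol g R C q = true ↔ ∀ i < R, ∀ j < C - q, ¬ pvConf (pvCell g i j) (pvCell g i (j + q)) := by
  simp [pvOkCol, pvConf, List.all_eq_true, not_and_or, -not_and, or_assoc]

theorem mem_foldl_set {β : Type} (G : PySem.Set Nat → β → PySem.Set Nat) (Q : β → Nat → Prop)
    (h : ∀ s e x, x ∈ G s e ↔ x ∈ s ∨ Q e x) :
    ∀ (l : List β) (s : PySem.Set Nat) (x : Nat), x ∈ l.foldl G s ↔ x ∈ s ∨ ∃ e ∈ l, Q e x := by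
  intro l
  induction l with
  | nil => simp
  | cons a t ih =>
    intro s x
    simp only [List.foldl_cons, ih, h, List.mem_cons]
    constructor
    · rintro ((hs | hq) | ⟨e, he, hq⟩)
      · exact Or.inl hs
      · exact Or.inr ⟨a, Or.inl rfl, hq⟩
      · exact Or.inr ⟨e, Or.inr he, hq⟩
    · rintro (hs | ⟨e, (rfl | he), hq⟩)
      · exact Or.inl (Or.inl hs)
      · exact Or.inl (Or.inr hq)
      · exact Or.inr ⟨e, he, hq⟩

theorem mem_inner_add (col : List (Nat × Int)) (e1 : Nat × Int) (s : PySem.Set Nat) (x : Nat) :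
    x ∈ col.foldl (fun s e2 => if e1.1 < e2.1 ∧ e1.2 ≠ e2.2 then PySem.Set.add s (e2.1 - e1.1) else s) s
      ↔ x ∈ s ∨ ∃ e2 ∈ col, e1.1 < e2.1 ∧ e1.2 ≠ e2.2 ∧ e2.1 - e1.1 = x :=
  mem_foldl_set _ (fun e2 x => e1.1 < e2.1 ∧ e1.2 ≠ e2.2 ∧ e2.1 - e1.1 = x)
    (fun s e2 x => by split_ifs with h <;> simp [PySem.Set.mem_add, h, eq_comm] <;> tauto) col s x

theorem mem_pvAddPairs (col : List (Nat × Int)) (s : PySem.Set Nat) (x : Nat) :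
    x ∈ pvAddPairs col s ↔ x ∈ s ∨ ∃ e1 ∈ col, ∃ e2 ∈ col, e1.1 < e2.1 ∧ e1.2 ≠ e2.2 ∧ e2.1 - e1.1 = x := by
  unfold pvAddPairs
  exact mem_foldl_set _ _ (fun s e1 x => mem_inner_add col e1 s x) col s x

theorem mem_pvColNZ (g : List (List Int)) (R j : Nat) (e : Nat × Int) :
    e ∈ pvColNZ g R j ↔ e.1 < R ∧ pvCell g e.1 j = e.2 ∧ e.2 ≠ 0 := by
  obtain ⟨i, v⟩ := e
  simp only [pvColNZ, List.mem_filterMap, List.mem_range, Option.ite_none_right_eq_some,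
    Option.some.injEq, Prod.mk.injEq]
  constructor
  · rintro ⟨a, ha, hnz, rfl, rfl⟩
    exact ⟨ha, rfl, hnz⟩
  · rintro ⟨hi, rfl, hnz⟩
    exact ⟨i, hi, hnz, rfl, rfl⟩

theorem mem_pvRowNZ (g : List (List Int)) (C i : Nat) (e : Nat × Int) :
    e ∈ pvRowNZ g C i ↔ e.1 < C ∧ pvCell g i e.1 = e.2 ∧ e.2 ≠ 0 := by
  obtain ⟨j, v⟩ := e
  simp only [pvRowNZ, List.mem_filterMap, List.mem_range, Option.ite_none_right_eq_some,
    Option.some.injEq, Prod.mk.injEq]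
  constructor
  · rintro ⟨a, ha, hnz, rfl, rfl⟩
    exact ⟨ha, rfl, hnz⟩
  · rintro ⟨hj, rfl, hnz⟩
    exact ⟨j, hj, hnz, rfl, rfl⟩

theorem mem_pvBadR (g : List (List Int)) (p : Nat) :
    p ∈ pvBadR g ↔ ∃ j < (g.headD []).length, ∃ i1, ∃ i2, i1 < i2 ∧ i2 < g.length ∧
      pvConf (pvCell g i1 j) (pvCell g i2 j) ∧ i2 - i1 = p := by
  unfold pvBadR
  rw [mem_foldl_set _
      (fun j x => ∃ e1 ∈ pvColNZ g g.length j, ∃ e2 ∈ pvColNZ g g.length j,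
        e1.1 < e2.1 ∧ e1.2 ≠ e2.2 ∧ e2.1 - e1.1 = x)
      (fun s j x => mem_pvAddPairs _ s x) _ _ _]
  simp only [List.mem_range, PySem.Set.empty, List.not_mem_nil, false_or, pvConf]
  constructor
  · rintro ⟨j, hj, ⟨i1, v1⟩, h1, ⟨i2, v2⟩, h2, hlt, hne, hsub⟩
    rw [mem_pvColNZ] at h1 h2
    obtain ⟨h1R, h1c, h1nz⟩ := h1
    obtain ⟨h2R, h2c, h2nz⟩ := h2
    exact ⟨j, hj, i1, i2, hlt, h2R, ⟨by simp_all, by simp_all, by simp_all⟩, hsub⟩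
  · rintro ⟨j, hj, i1, i2, hlt, h2R, ⟨hnz1, hnz2, hne⟩, hsub⟩
    refine ⟨j, hj, (i1, pvCell g i1 j), ?_, (i2, pvCell g i2 j), ?_, hlt, hne, hsub⟩
    · exact (mem_pvColNZ g g.length j _).mpr ⟨by omega, rfl, hnz1⟩
    · exact (mem_pvColNZ g g.length j _).mpr ⟨h2R, rfl, hnz2⟩

theorem mem_pvBadC (g : List (List Int)) (q : Nat) :
    q ∈ pvBadC g ↔ ∃ i < g.length, ∃ j1, ∃ j2, j1 < j2 ∧ j2 < (g.headD []).length ∧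
      pvConf (pvCell g i j1) (pvCell g i j2) ∧ j2 - j1 = q := by
  unfold pvBadC
  rw [mem_foldl_set _
      (fun i x => ∃ e1 ∈ pvRowNZ g (g.headD []).length i, ∃ e2 ∈ pvRowNZ g (g.headD []).length i,
        e1.1 < e2.1 ∧ e1.2 ≠ e2.2 ∧ e2.1 - e1.1 = x)
      (fun s i x => mem_pvAddPairs _ s x) _ _ _]
  simp only [List.mem_range, PySem.Set.empty, List.not_mem_nil, false_or, pvConf]
  constructor
  · rintro ⟨i, hi, ⟨j1, v1⟩, h1, ⟨j2, v2⟩, h2, hlt, hne, hsub⟩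
    rw [mem_pvRowNZ] at h1 h2
    obtain ⟨h1C, h1c, h1nz⟩ := h1
    obtain ⟨h2C, h2c, h2nz⟩ := h2
    exact ⟨i, hi, j1, j2, hlt, h2C, ⟨by simp_all, by simp_all, by simp_all⟩, hsub⟩
  · rintro ⟨i, hi, j1, j2, hlt, h2C, ⟨hnz1, hnz2, hne⟩, hsub⟩
    refine ⟨i, hi, (j1, pvCell g i j1), ?_, (j2, pvCell g i j2), ?_, hlt, hne, hsub⟩
    · exact (mem_pvRowNZ g (g.headD []).length i _).mpr ⟨by omega, rfl, hnz1⟩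
    · exact (mem_pvRowNZ g (g.headD []).length i _).mpr ⟨h2C, rfl, hnz2⟩

theorem pvOkRow_eq_not_contains (g : List (List Int)) (p : Nat) (hp : 1 ≤ p) :
    pvOkRow g g.length (g.headD []).length p = !(PySem.Set.contains (pvBadR g) p) := by
  have key : pvOkRow g g.length (g.headD []).length p = true ↔ ¬ p ∈ pvBadR g := by
    rw [pvOkRow_iff, mem_pvBadR]
    constructor
    · rintro hok ⟨j, hj, i1, i2, hlt, h2R, hconf, hsub⟩
      have h2 : i2 = i1 + p := by omega
      exact hok i1 (by omega) j hj (h2 ▸ hconf)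
    · intro hmem i hi j hj hconf
      exact hmem ⟨j, hj, i, i + p, by omega, by omega, hconf, by omega⟩
  by_cases hm : p ∈ pvBadR g
  · rw [(PySem.Set.contains_iff _ _).mpr hm, Bool.not_true, Bool.eq_false_iff]
    intro ht; exact key.mp ht hm
  · have hc : PySem.Set.contains (pvBadR g) p = false := by
      rw [← Bool.not_eq_true, PySem.Set.contains_iff]; exact hm
    rw [hc, Bool.not_false]
    exact key.mpr hm

theorem pvOkCol_eq_not_contains (g : List (List Int)) (q : Nat) (hq : 1 ≤ q) :
    pvOkCol g g.length (g.headD []).length q = !(PySem.Set.contains (pvBadC g) q) := by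
  have key : pvOkCol g g.length (g.headD []).length q = true ↔ ¬ q ∈ pvBadC g := by
    rw [pvOkCol_iff, mem_pvBadC]
    constructor
    · rintro hok ⟨i, hi, j1, j2, hlt, h2C, hconf, hsub⟩
      have h2 : j2 = j1 + q := by omega
      exact hok i hi j1 (by omega) (h2 ▸ hconf)
    · intro hmem i hi j hj hconf
      exact hmem ⟨i, hi, j, j + q, by omega, by omega, hconf, by omega⟩
  by_cases hm : q ∈ pvBadC g
  · rw [(PySem.Set.contains_iff _ _).mpr hm, Bool.not_true, Bool.eq_false_iff]
    intro ht; exact key.mp ht hm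
  · have hc : PySem.Set.contains (pvBadC g) q = false := by
      rw [← Bool.not_eq_true, PySem.Set.contains_iff]; exact hm
    rw [hc, Bool.not_false]
    exact key.mpr hm

theorem find?_congr_mem {p q : Nat → Bool} (l : List Nat) (h : ∀ a ∈ l, p a = q a) :
    l.find? p = l.find? q := by
  induction l with
  | nil => rfl
  | cons x t ih =>
    simp only [List.find?_cons]; rw [h x (by simp)]
    split
    · rfl
    · exact ih fun a ha => h a (by simp [ha])

theorem pvOkRow_self (g : List (List Int)) (R C : Nat) : pvOkRow g R C R = true := by
  simp [pvOkRow]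

theorem pvOkCol_self (g : List (List Int)) (R C : Nat) : pvOkCol g R C C = true := by
  simp [pvOkCol]

theorem pvPr_eq (g : List (List Int)) (hR : 1 ≤ g.length) : pvPrA g = pvPrB g := by
  unfold pvPrA pvPrB
  have hsplit : List.range' 1 g.length = List.range' 1 (g.length - 1) ++ [g.length] := by
    have h1 : List.range' (1 + (g.length - 1)) 1 = [g.length] := by
      rw [show 1 + (g.length - 1) = g.length from by omega]
      exact List.range'_one
    rw [← h1]
    have := List.range'_append (s := 1) (m := g.length - 1) (n := 1) (step := 1)
    simp only [Nat.one_mul] at this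
    rw [this]
    congr 1
    omega
  rw [hsplit, List.find?_append]
  rw [find?_congr_mem (q := fun p => !(PySem.Set.contains (pvBadR g) p))
        _ (fun a ha => pvOkRow_eq_not_contains g a (by
          have := List.mem_range'_1.mp ha; omega))]
  cases hf : (List.range' 1 (g.length - 1)).find? (fun p => !(PySem.Set.contains (pvBadR g) p)) with
  | some x => simp
  | none => simp [List.find?, pvOkRow_self]

theorem pvPc_eq (g : List (List Int)) : pvPcA g = pvPcB g := by
  by_cases hC : 1 ≤ (g.headD []).length
  · unfold pvPcA pvPcB
    have hsplit : List.range' 1 (g.headD []).length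
        = List.range' 1 ((g.headD []).length - 1) ++ [(g.headD []).length] := by
      have h1 : List.range' (1 + ((g.headD []).length - 1)) 1 = [(g.headD []).length] := by
        rw [show 1 + ((g.headD []).length - 1) = (g.headD []).length from by omega]
        exact List.range'_one
      rw [← h1]
      have := List.range'_append (s := 1) (m := (g.headD []).length - 1) (n := 1) (step := 1)
      simp only [Nat.one_mul] at this
      rw [this]
      congr 1
      omega
    rw [hsplit, List.find?_append]
    rw [find?_congr_mem (q := fun q => !(PySem.Set.contains (pvBadC g) q))
          _ (fun a ha => pvOkCol_eq_not_contains g a (by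
            have := List.mem_range'_1.mp ha; omega))]
    cases hf : (List.range' 1 ((g.headD []).length - 1)).find? (fun q => !(PySem.Set.contains (pvBadC g) q)) with
    | some x => simp
    | none => simp [List.find?, pvOkCol_self]
  · have h0 : (g.headD []).length = 0 := by omega
    unfold pvPcA pvPcB
    rw [h0]
    rfl

theorem pvPrA_pos (g : List (List Int)) (hR : 1 ≤ g.length) : 1 ≤ pvPrA g := by
  unfold pvPrA
  cases hf : (List.range' 1 g.length).find? (pvOkRow g g.length (g.headD []).length) with
  | none => simpa using hR
  | some x =>
    have hx := List.mem_of_find?_eq_some hf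
    have := List.mem_range'_1.mp hx
    simpa using this.1

theorem pvPcA_pos (g : List (List Int)) (hC : 1 ≤ (g.headD []).length) : 1 ≤ pvPcA g := by
  unfold pvPcA
  cases hf : (List.range' 1 (g.headD []).length).find? (pvOkCol g g.length (g.headD []).length) with
  | none => simpa using hC
  | some x =>
    have hx := List.mem_of_find?_eq_some hf
    have := List.mem_range'_1.mp hx
    simpa using this.1

theorem pvUpd2_getD (t : List (List Int)) (a b a' b' : Nat) (v : Int)
    (ha : a < t.length) (hb : b < (t.getD a []).length) :
    ((pvUpd2 t a b v).getD a' []).getD b' 0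
      = if a' = a ∧ b' = b then v else (t.getD a' []).getD b' 0 := by
  unfold pvUpd2
  simp only [List.getD_eq_getElem?_getD] at hb ⊢
  split_ifs with hcond
  · obtain ⟨rfl, rfl⟩ := hcond
    rw [List.getElem?_set_self ha]
    simp only [Option.getD_some, List.getElem?_set_self hb]
  · by_cases h1 : a' = a
    · subst h1
      have hb' : b' ≠ b := fun h => hcond ⟨rfl, h⟩
      rw [List.getElem?_set_self ha]
      simp only [Option.getD_some, List.getElem?_set]
      rw [if_neg (fun h : b = b' => hb' h.symm)]
    · simp only [List.getElem?_set]
      rw [if_neg (fun h : a = a' => h1 h.symm)]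

theorem row_len (t : List (List Int)) (pc : Nat) (hrow : ∀ r ∈ t, r.length = pc)
    (a : Nat) (ha : a < t.length) : (t.getD a []).length = pc := by
  rw [List.getD_eq_getElem?_getD, List.getElem?_eq_getElem ha]
  exact hrow _ (List.getElem_mem ha)

theorem tile_rel (g : List (List Int)) (pr pc : Nat) (hpr : 0 < pr) (hpc : 0 < pc) :
    ∀ (ps : List (Nat × Nat)) (t : List (List Int)) (d : PySem.Dict (Nat × Nat) Int),
    t.length = pr → (∀ r ∈ t, r.length = pc) →
    (∀ a b, a < pr → b < pc → (t.getD a []).getD b 0 = ((d.get? (a, b)).getD 0)) →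
    (ps.foldl (fun t p => if pvCell g p.1 p.2 ≠ 0 then pvUpd2 t (p.1 % pr) (p.2 % pc) (pvCell g p.1 p.2) else t) t).length = pr ∧
    (∀ r ∈ ps.foldl (fun t p => if pvCell g p.1 p.2 ≠ 0 then pvUpd2 t (p.1 % pr) (p.2 % pc) (pvCell g p.1 p.2) else t) t, r.length = pc) ∧
    (∀ a b, a < pr → b < pc →
      ((ps.foldl (fun t p => if pvCell g p.1 p.2 ≠ 0 then pvUpd2 t (p.1 % pr) (p.2 % pc) (pvCell g p.1 p.2) else t) t).getD a []).getD b 0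
        = (((ps.foldl (fun d p => if pvCell g p.1 p.2 ≠ 0 then d.insert (p.1 % pr, p.2 % pc) (pvCell g p.1 p.2) else d) d).get? (a, b)).getD 0)) := by
  intro ps
  induction ps with
  | nil => intro t d h1 h2 h3; exact ⟨h1, h2, h3⟩
  | cons e rest ih =>
    intro t d h1 h2 h3
    simp only [List.foldl_cons]
    by_cases hv : pvCell g e.1 e.2 ≠ 0
    · simp only [if_pos hv]
      have hic : e.1 % pr < t.length := by rw [h1]; exact Nat.mod_lt _ hpr
      have hjc : e.2 % pc < (t.getD (e.1 % pr) []).length := by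
        rw [row_len t pc h2 _ hic]; exact Nat.mod_lt _ hpc
      apply ih
      · simp [pvUpd2, h1]
      · intro r hr
        rcases List.mem_or_eq_of_mem_set hr with h | h
        · exact h2 r h
        · subst h
          rw [List.length_set, row_len t pc h2 _ hic]
      · intro a b ha hb
        rw [pvUpd2_getD t _ _ _ _ _ hic hjc, PySem.Dict.get?_insert]
        by_cases hc : a = e.1 % pr ∧ b = e.2 % pc
        · rw [if_pos hc, if_pos (by simp [hc.1, hc.2])]
          rfl
        · rw [if_neg hc, if_neg (by simp [Prod.ext_iff]; exact fun x y => hc ⟨x, y⟩)]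
          exact h3 a b ha hb
    · simp only [if_neg hv]
      exact ih t d h1 h2 h3

theorem foldl_nested {α β γ : Type} (l1 : List β) (l2 : List γ) (f : α → β → γ → α) (a : α) :
    l1.foldl (fun a i => l2.foldl (fun a j => f a i j) a) a
      = (l1.flatMap (fun i => l2.map (fun j => (i, j)))).foldl (fun a p => f a p.1 p.2) a := by
  induction l1 generalizing a with
  | nil => rfl
  | cons x t ih => simp [List.foldl_append, List.foldl_map, ih]

theorem tile_agree (g : List (List Int)) (pr pc : Nat) (hpr : 0 < pr) (hpc : 0 < pc) (a b : Nat)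
    (ha : a < pr) (hb : b < pc) :
    pvCell (pvTileA g pr pc) a b = (((pvTileB g pr pc).get? (a, b)).getD 0) := by
  unfold pvCell pvTileA pvTileB
  rw [foldl_nested, foldl_nested]
  refine (tile_rel g pr pc hpr hpc _ _ _ (by simp) (fun r hr => (List.eq_of_mem_replicate hr) ▸ by simp) ?_).2.2 a b ha hb
  intro a' b' ha' hb'
  simp [List.getD_eq_getElem?_getD, ha', hb', PySem.Dict.get?_empty]

theorem copy_id (grid : List (List Int)) : grid.map (fun row => row.foldr List.cons []) = grid := by
  simp

theorem transform_spec_core (grid : List (List Int))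
    (hpre : grid ≠ [] ∧ ∀ row ∈ grid, (grid.headD []).length ≤ row.length) :
    transform grid = transform_alt grid := by
  obtain ⟨hnil, hge⟩ := hpre
  have hR : 0 < grid.length := List.length_pos_iff.mpr hnil
  by_cases hC : 0 < (grid.headD []).length
  · have hpr : 0 < pvPrA grid := pvPrA_pos grid hR
    have hpc : 0 < pvPcA grid := pvPcA_pos grid hC
    simp only [transform, transform_alt]
    rw [← pvPr_eq grid hR, ← pvPc_eq grid]
    have hout0A : grid.map (fun row => PySem.List.slice row none none) = grid := by
      simp [PySem.List.slice_none_none]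
    rw [hout0A, copy_id]
    congr 1
    funext o i
    congr 1
    funext o j
    rw [tile_agree grid (pvPrA grid) (pvPcA grid) hpr hpc _ _ (Nat.mod_lt _ hpr) (Nat.mod_lt _ hpc)]
  · -- C = 0 : both folds fill nothing and both copies are the grid itself
    have hC0 : (grid.headD []).length = 0 := by omega
    simp only [transform, transform_alt, hC0]
    simp only [List.range_zero, List.foldl_nil, copy_id]
    have hout0A : grid.map (fun row => PySem.List.slice row none none) = grid := by
      simp [PySem.List.slice_none_none]
    rw [hout0A]

-- ===== VERDICT (by name: the statement is the Claim_ definition above) =====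
theorem transform_spec : Claim_equal_transform := by
  intro grid _ hpre
  exact transform_spec_core grid hpre
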